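-- pv_equiv track=rewrite | github.com/igoroya/pycodingkatas | katas/may2018/exer.py | reorder_char_array
-- ===== SOURCE A (Python) =====
-- def reorder_char_array(char_array):
--     new_array = ''
--     temp_string = ''
--     words = []
--
--     for c in char_array:
--         temp_string = temp_string + c
--         if c == ';':
--             temp_string = temp_string[:len(temp_string) - 1]
--             new_array += temp_string
--             words.append(new_array)
--             new_array = ''
--             temp_string = ''
--
--     new_array += temp_string
--     words.append(new_array)
--     new_array = ''
--     temp_string = ''
--
--
--     n_words = len(words)
--
--     rev_text = ''
--
--     for i in reversed(range(0, n_words)):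
--         rev_text += words[i]
--         rev_text += ';'
--
--     rev_text = rev_text[:len(rev_text) - 1]
--     return rev_text
-- ===== SOURCE B (Python) =====
-- def reorder_char_array(char_array):
--     # Reverse the whole string, then reverse each maximal non-';' run back
--     # to forward order; segment order ends up reversed, separators stay.
--     out = []
--     run = []
--     for c in reversed(char_array):
--         if c == ';':
--             run.reverse()
--             out.extend(run)
--             out.append(';')
--             run = []
--         else:
--             run.append(c)
--     run.reverse()
--     out.extend(run)
--     return ''.join(out)
-- ===== Notes on version B (the rewrite author's own statement) =====
-- stated objective: alternative
-- what changed: Instead of accumulating segments into a words list and re-joining them by index in a second reversed-range loop, B reverses the whole string once and re-reverses each maximal non-';' run in a single pass, never building a segment list.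
import Mathlib
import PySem

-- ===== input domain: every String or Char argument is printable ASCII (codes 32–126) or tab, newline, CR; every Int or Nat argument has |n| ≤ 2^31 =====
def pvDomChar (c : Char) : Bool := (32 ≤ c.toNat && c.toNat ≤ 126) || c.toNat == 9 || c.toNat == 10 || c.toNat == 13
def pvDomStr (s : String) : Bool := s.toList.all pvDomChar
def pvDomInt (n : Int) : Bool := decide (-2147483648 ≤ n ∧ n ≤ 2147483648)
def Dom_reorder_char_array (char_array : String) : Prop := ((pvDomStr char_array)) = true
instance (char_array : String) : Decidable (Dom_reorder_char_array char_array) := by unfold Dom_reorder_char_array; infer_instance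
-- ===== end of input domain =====

-- B replaces A's words-list accumulation + indexed re-join with a single pass over the
-- reversed string that re-reverses each non-';' run (same output; objective: alternative).


-- ===== PORT A =====
-- the for-loop over the characters: state (new_array, temp_string, words)
def pvLoopA : List Char → List Char → List Char → List (List Char) →
    List Char × List Char × List (List Char)
  | [], na, ts, ws => (na, ts, ws)
  | c :: cs, na, ts, ws =>
    let ts1 := ts ++ [c]
    if c == ';' then
      let ts2 := ts1.take (ts1.length - 1)
      pvLoopA cs [] [] (ws ++ [na ++ ts2])
    else
      pvLoopA cs na ts1 ws

def reorder_char_array (char_array : String) : String :=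
  let r := pvLoopA char_array.toList [] [] []
  let words := r.2.2 ++ [r.1 ++ r.2.1]
  let n_words := words.length
  -- for i in reversed(range(0, n_words)): rev_text += words[i]; rev_text += ';'
  let rev_text := (List.range n_words).reverse.foldl
      (fun acc i => acc ++ words.getD i [] ++ [';']) []
  String.ofList (rev_text.take (rev_text.length - 1))

-- ===== PORT B =====
-- one pass over the reversed characters: state (out, run)
def pvLoopB : List Char → List Char → List Char → List Char × List Char
  | [], out, run => (out, run)
  | c :: cs, out, run =>
    if c == ';' then
      pvLoopB cs (out ++ run.reverse ++ [';']) []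
    else
      pvLoopB cs out (run ++ [c])

def reorder_char_array_alt (char_array : String) : String :=
  let r := pvLoopB char_array.toList.reverse [] []
  String.ofList (r.1 ++ r.2.reverse)

-- ===== PRECONDITION & SPEC =====
def Spec_reorder_char_array (char_array : String) (out : String) : Prop := out = reorder_char_array_alt char_array
instance (char_array : String) (out : String) : Decidable (Spec_reorder_char_array char_array out) := by unfold Spec_reorder_char_array; infer_instance

-- ===== CLAIM (what is proved, stated in full; the proofs are below) =====
def Claim_equal_reorder_char_array : Prop := ∀ (char_array : String), Dom_reorder_char_array char_array → Spec_reorder_char_array char_array (reorder_char_array char_array)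

-- ===== LEMMAS AND PROOFS =====

-- split on ';' with accumulator (the canonical middle form both ports reduce to)
def pvSpl : List Char → List Char → List (List Char)
  | [], acc => [acc]
  | c :: cs, acc => if c = ';' then acc :: pvSpl cs [] else pvSpl cs (acc ++ [c])

-- join with ';'
def pvJoin : List (List Char) → List Char
  | [] => []
  | [w] => w
  | w :: x :: ws => w ++ ';' :: pvJoin (x :: ws)

-- append a char to the last segment
def pvSnocLast : List (List Char) → Char → List (List Char)
  | [], c => [[c]]
  | [w], c => [w ++ [c]]
  | w :: x :: ws, c => w :: pvSnocLast (x :: ws) c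

theorem pvSpl_ne_nil (l acc : List Char) : pvSpl l acc ≠ [] := by
  induction l generalizing acc with
  | nil => simp [pvSpl]
  | cons c cs ih => simp only [pvSpl]; split_ifs <;> simp [ih]

theorem pvJoin_cons (w : List Char) (L : List (List Char)) (h : L ≠ []) :
    pvJoin (w :: L) = w ++ ';' :: pvJoin L := by
  cases L with
  | nil => exact absurd rfl h
  | cons x xs => rfl

theorem pvSnocLast_append (L : List (List Char)) (w : List Char) (c : Char) :
    pvSnocLast (L ++ [w]) c = L ++ [w ++ [c]] := by
  induction L with
  | nil => rfl
  | cons a L ih =>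
    cases L with
    | nil => rfl
    | cons b L => simpa [pvSnocLast] using ih

theorem pvSpl_acc (l : List Char) (acc : List Char) :
    pvSpl l acc = (acc ++ (pvSpl l []).headI) :: (pvSpl l []).tail := by
  induction l generalizing acc with
  | nil => simp [pvSpl]
  | cons c cs ih =>
    by_cases hc : c = ';'
    · simp [pvSpl, hc]
    · rw [pvSpl, if_neg hc, ih, pvSpl, if_neg hc]
      simp only [List.nil_append]
      rw [ih [c]]
      simp

theorem pvSpl_snoc (l : List Char) (c : Char) (acc : List Char) :
    pvSpl (l ++ [c]) acc =
      if c = ';' then pvSpl l acc ++ [[]] else pvSnocLast (pvSpl l acc) c := by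
  induction l generalizing acc with
  | nil =>
    by_cases hc : c = ';' <;> simp [pvSpl, pvSnocLast, hc]
  | cons d ds ih =>
    by_cases hd : d = ';'
    · rw [List.cons_append, pvSpl, if_pos hd, ih, pvSpl, if_pos hd]
      by_cases hc : c = ';'
      · simp [hc]
      · rw [if_neg hc, if_neg hc]
        have hne := pvSpl_ne_nil ds []
        cases h : pvSpl ds [] with
        | nil => exact absurd h hne
        | cons w ws => simp [pvSnocLast]
    · rw [List.cons_append, pvSpl, if_neg hd, ih, pvSpl, if_neg hd]

-- key lemma: splitting the reversed string gives the reversed list of reversed segments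
theorem pvSpl_rev (l : List Char) :
    pvSpl l.reverse [] = ((pvSpl l []).map List.reverse).reverse := by
  induction l with
  | nil => simp [pvSpl]
  | cons c cs ih =>
    rw [List.reverse_cons, pvSpl_snoc]
    by_cases hc : c = ';'
    · rw [if_pos hc, ih, pvSpl, if_pos hc]
      simp
    · rw [if_neg hc, ih, pvSpl, if_neg hc]
      simp only [List.nil_append]
      rw [pvSpl_acc cs [c]]
      have hne := pvSpl_ne_nil cs []
      cases h : pvSpl cs [] with
      | nil => exact absurd h hne
      | cons w ws =>
        simp only [List.headI, List.tail, List.map_cons, List.reverse_cons]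
        rw [pvSnocLast_append]
        simp

-- A's first loop builds exactly pvSpl
theorem pvLoopA_words (cs ts : List Char) (ws : List (List Char)) :
    (pvLoopA cs [] ts ws).2.2 ++ [(pvLoopA cs [] ts ws).1 ++ (pvLoopA cs [] ts ws).2.1] =
      ws ++ pvSpl cs ts := by
  induction cs generalizing ts ws with
  | nil => simp [pvLoopA, pvSpl]
  | cons c cs ih =>
    by_cases hc : c = ';'
    · subst hc
      have hts : (ts ++ [';']).take ((ts ++ [';']).length - 1) = ts := by
        simp
      rw [pvLoopA]
      simp only [beq_self_eq_true, if_true, hts, List.nil_append]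
      rw [ih, pvSpl, if_pos rfl]
      simp
    · rw [pvLoopA]
      simp only [beq_iff_eq, hc, if_false]
      rw [ih, pvSpl, if_neg hc]

-- generic foldl congruence on list members
theorem pvFoldl_congr {α β : Type} (l : List β) (f g : α → β → α) (a : α)
    (h : ∀ x ∈ l, ∀ acc, f acc x = g acc x) : l.foldl f a = l.foldl g a := by
  induction l generalizing a with
  | nil => rfl
  | cons x xs ih =>
    simp only [List.foldl_cons]
    rw [h x (by simp), ih _ (fun y hy acc => h y (by simp [hy]) acc)]

-- A's second loop flattens the reversed words, each followed by ';'
theorem pvRevLoop (ws : List (List Char)) (acc : List Char) :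
    (List.range ws.length).reverse.foldl (fun a i => a ++ ws.getD i [] ++ [';']) acc =
      acc ++ (ws.reverse.map (· ++ [';'])).flatten := by
  induction ws using List.reverseRecOn generalizing acc with
  | nil => simp
  | append_singleton ws w ih =>
    rw [List.length_append, List.length_singleton, List.range_succ, List.reverse_append]
    simp only [List.reverse_singleton, List.singleton_append, List.foldl_cons]
    have hget : (ws ++ [w]).getD ws.length [] = w := by
      simp [List.getD]
    rw [hget]
    rw [pvFoldl_congr ((List.range ws.length).reverse) _
      (fun a i => a ++ ws.getD i [] ++ [';']) _
      (fun i hi acc => by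
        have : i < ws.length := by
          have := List.mem_reverse.mp hi; simpa [List.mem_range] using this
        simp [List.getD, List.getElem?_append_left this])]
    rw [ih]
    simp

theorem pvFlat_join (L : List (List Char)) (h : L ≠ []) :
    (L.map (· ++ [';'])).flatten = pvJoin L ++ [';'] := by
  induction L with
  | nil => exact absurd rfl h
  | cons w ws ih =>
    cases ws with
    | nil => simp [pvJoin]
    | cons x xs =>
      rw [List.map_cons, List.flatten_cons, ih (by simp)]
      simp [pvJoin]

-- B's loop computes pvJoin of the reversed-segment split
theorem pvLoopB_spec (cs out run : List Char) :
    (pvLoopB cs out run).1 ++ (pvLoopB cs out run).2.reverse =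
      out ++ pvJoin ((pvSpl cs run).map List.reverse) := by
  induction cs generalizing out run with
  | nil => simp [pvLoopB, pvSpl, pvJoin]
  | cons c cs ih =>
    by_cases hc : c = ';'
    · subst hc
      rw [pvLoopB]
      simp only [beq_self_eq_true, if_true]
      rw [ih, pvSpl, if_pos rfl, List.map_cons,
        pvJoin_cons _ _ (by simp [pvSpl_ne_nil])]
      simp
    · rw [pvLoopB]
      simp only [beq_iff_eq, hc, if_false]
      rw [ih, pvSpl, if_neg hc]

-- A equals the canonical form
theorem pvA_eq (s : String) :
    reorder_char_array s = String.ofList (pvJoin ((pvSpl s.toList []).reverse)) := by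
  unfold reorder_char_array
  have hw := pvLoopA_words s.toList [] []
  simp only [List.nil_append] at hw
  simp only [hw, pvRevLoop]
  rw [List.nil_append, pvFlat_join _ (by simp [pvSpl_ne_nil])]
  congr 1
  rw [List.length_append, List.length_singleton]
  simp

-- B equals the canonical form
theorem pvB_eq (s : String) :
    reorder_char_array_alt s = String.ofList (pvJoin ((pvSpl s.toList []).reverse)) := by
  show String.ofList ((pvLoopB s.toList.reverse [] []).1 ++
      (pvLoopB s.toList.reverse [] []).2.reverse) = _
  have hb := pvLoopB_spec s.toList.reverse [] []
  simp only [List.nil_append] at hb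
  rw [hb, pvSpl_rev]
  congr 2
  rw [List.map_reverse, List.map_map]
  simp

-- ===== VERDICT (by name: the statement is the Claim_ definition above) =====
theorem reorder_char_array_spec : Claim_equal_reorder_char_array := by
  intro s _
  unfold Spec_reorder_char_array
  rw [pvA_eq, pvB_eq]
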